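-- pv_equiv track=rewrite | github.com/kimphuong2104/tachcode1 | cs/pcs/timeschedule/web/models/helpers.py | get_oids_by_relation
-- ===== SOURCE A (Python) =====
-- from itertools import groupby
-- from operator import itemgetter
--
-- def get_oids_by_relation(pcs_oids):
--     """
--     :param pcs_oids: cdb_object_ids and database table names of objects.
--     :type pcs_oids: list of `PCS_OID`
--
--     :returns: list of cdb_object_ids grouped by database table names
--     :rtype: list of tuple(str, list)
--
--     :raises ValueError: if
--         - `pcs_oids` or one of its values is not iterable,
--         - any value contains less than 2 value.
--     """
--     oids_by_relation = []
--     try: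
--         sorted_oids = sorted(pcs_oids, key=itemgetter(1))
--     except TypeError as exc:
--         raise ValueError(
--             f"value (or one of its values) is not iterable: '{pcs_oids}'"
--         ) from exc
--     except IndexError as exc:
--         raise ValueError(
--             f"each value must contain at least 2 values: '{pcs_oids}'"
--         ) from exc
--
--     for relation, oids in groupby(sorted_oids, itemgetter(1)):
--         oids_by_relation.append((relation, [o[0] for o in oids]))
--
--     return oids_by_relation
-- ===== SOURCE B (Python) =====
-- from operator import itemgetter
--
-- def get_oids_by_relation(pcs_oids):
--     grouped = {}
--     for o in pcs_oids:
--         grouped.setdefault(o[1], []).append(o[0])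
--     return sorted(grouped.items(), key=itemgetter(0))
-- ===== Notes on version B (the rewrite author's own statement) =====
-- stated objective: alternative
-- what changed: Replaces sort-then-itertools.groupby with a single-pass dict grouping (setdefault/append preserving first-seen stable order per relation) followed by one final sort of the items by relation.
import Mathlib
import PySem

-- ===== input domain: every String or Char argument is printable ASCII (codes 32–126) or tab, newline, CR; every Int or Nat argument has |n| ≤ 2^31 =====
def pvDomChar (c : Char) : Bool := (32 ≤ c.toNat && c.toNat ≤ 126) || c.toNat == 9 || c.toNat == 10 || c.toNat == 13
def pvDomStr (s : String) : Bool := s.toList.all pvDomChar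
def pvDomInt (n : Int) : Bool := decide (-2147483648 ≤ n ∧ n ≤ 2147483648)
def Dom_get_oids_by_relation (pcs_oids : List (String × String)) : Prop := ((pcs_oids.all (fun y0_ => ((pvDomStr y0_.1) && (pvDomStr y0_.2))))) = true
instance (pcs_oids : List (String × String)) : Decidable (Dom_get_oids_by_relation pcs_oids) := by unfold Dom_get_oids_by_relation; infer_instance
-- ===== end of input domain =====

-- B replaces A's sort-then-itertools.groupby with a one-pass dict grouping plus one final
-- sort of the items by relation (alternative algorithm/data structure, same return value).

-- ===== PORT A =====
-- itertools.groupby over the sorted list, fused with the loop body '(relation, [o[0] for o in oids])':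
-- consecutive elements with equal second component form one group.
def pvGroupbyA : List (String × String) → List (String × List String)
  | [] => []
  | p :: ps =>
      (p.2, p.1 :: (ps.takeWhile (fun q => q.2 == p.2)).map (fun q => q.1)) ::
      pvGroupbyA (ps.dropWhile (fun q => q.2 == p.2))
termination_by l => l.length
decreasing_by
  simp only [List.length_cons]
  have := List.length_dropWhile_le (fun q : String × String => q.2 == p.2) ps
  omega

def get_oids_by_relation (pcs_oids : List (String × String)) : List (String × List String) :=
  let sorted_oids := PySem.List.sorted pcs_oids (fun o => o.2)
  pvGroupbyA sorted_oids

-- ===== PORT B =====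
-- 'grouped.setdefault(o[1], []).append(o[0])' is exactly 'modify o.2 with default [] appending o.1'.
def get_oids_by_relation_alt (pcs_oids : List (String × String)) : List (String × List String) :=
  let grouped := pcs_oids.foldl (fun d o => d.modify o.2 [] (fun l => l ++ [o.1])) PySem.Dict.empty
  PySem.List.sorted grouped.items (fun p => p.1)

-- ===== PRECONDITION & SPEC =====
def Spec_get_oids_by_relation (pcs_oids : List (String × String)) (out : List (String × List String)) : Prop := out = get_oids_by_relation_alt pcs_oids
instance (pcs_oids : List (String × String)) (out : List (String × List String)) : Decidable (Spec_get_oids_by_relation pcs_oids out) := by unfold Spec_get_oids_by_relation; infer_instance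

-- ===== CLAIM (what is proved, stated in full; the proofs are below) =====
def Claim_equal_get_oids_by_relation : Prop := ∀ (pcs_oids : List (String × String)), Dom_get_oids_by_relation pcs_oids → Spec_get_oids_by_relation pcs_oids (get_oids_by_relation pcs_oids)

-- ===== LEMMAS AND PROOFS =====

-- insertBy (by key <) keeps the accumulator sorted by key
theorem pv_insertBy_pairwise (x : String × String) (acc : List (String × String))
    (h : acc.Pairwise (fun a b => a.2 ≤ b.2)) :
    (PySem.List.insertBy (fun a b => decide (a.2 < b.2)) x acc).Pairwise (fun a b => a.2 ≤ b.2) := by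
  induction acc with
  | nil => simp [PySem.List.insertBy]
  | cons y ys ih =>
    rw [List.pairwise_cons] at h
    obtain ⟨hy, hys⟩ := h
    by_cases hlt : x.2 < y.2
    · simp only [PySem.List.insertBy, hlt, decide_true, if_true]
      refine List.pairwise_cons.mpr ⟨?_, List.pairwise_cons.mpr ⟨hy, hys⟩⟩
      intro z hz
      rcases List.mem_cons.mp hz with rfl | hz
      · exact le_of_lt hlt
      · exact le_trans (le_of_lt hlt) (hy z hz)
    · simp only [PySem.List.insertBy, hlt, decide_false]
      refine List.pairwise_cons.mpr ⟨?_, ih hys⟩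
      intro z hz
      rcases (PySem.List.mem_insertBy _ _ _ _).mp hz with rfl | hz
      · exact le_of_not_gt hlt
      · exact hy z hz

-- filtering one equal-key class through an insertion: the new element lands at the end of its class
theorem pv_filter_insertBy (x : String × String) (acc : List (String × String)) (k : String)
    (h : acc.Pairwise (fun a b => a.2 ≤ b.2)) :
    (PySem.List.insertBy (fun a b => decide (a.2 < b.2)) x acc).filter (fun q => q.2 == k) =
      if x.2 == k then acc.filter (fun q => q.2 == k) ++ [x]
      else acc.filter (fun q => q.2 == k) := by
  induction acc with
  | nil =>
    by_cases hxk : x.2 = k <;> simp [PySem.List.insertBy, List.filter, hxk]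
  | cons y ys ih =>
    rw [List.pairwise_cons] at h
    obtain ⟨hy, hys⟩ := h
    by_cases hlt : x.2 < y.2
    · simp only [PySem.List.insertBy, hlt, decide_true, if_true]
      by_cases hxk : x.2 = k
      · have hempty : (y :: ys).filter (fun q => q.2 == k) = [] := by
          rw [List.filter_eq_nil_iff]
          intro z hz
          have hzge : y.2 ≤ z.2 := by
            rcases List.mem_cons.mp hz with rfl | hz
            · exact le_refl _
            · exact hy z hz
          simp only [beq_iff_eq]
          intro hzk
          rw [hzk, ← hxk] at hzge
          exact absurd (lt_of_lt_of_le hlt hzge) (lt_irrefl _)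
        rw [List.filter_cons_of_pos (by simp [hxk]), hempty]
        simp [hxk]
      · rw [List.filter_cons_of_neg (by simp [hxk])]
        simp [hxk]
    · simp only [PySem.List.insertBy, hlt, decide_false]
      rw [if_neg (by simp)]
      have hrec := ih hys
      by_cases hyk : y.2 = k
      · rw [List.filter_cons_of_pos (by simp [hyk]), List.filter_cons_of_pos (by simp [hyk]), hrec]
        by_cases hxk : x.2 = k <;> simp [hxk]
      · rw [List.filter_cons_of_neg (by simp [hyk]), List.filter_cons_of_neg (by simp [hyk]), hrec]

-- the insertion-sort fold, filtered to one key class, appends the class of the input in order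
theorem pv_filter_foldl (xs : List (String × String)) (k : String) :
    ∀ acc : List (String × String), acc.Pairwise (fun a b => a.2 ≤ b.2) →
    (xs.foldl (fun a x => PySem.List.insertBy (fun a b => decide (a.2 < b.2)) x a) acc).filter
        (fun q => q.2 == k) =
      acc.filter (fun q => q.2 == k) ++ xs.filter (fun q => q.2 == k) := by
  induction xs with
  | nil => intro acc _; simp
  | cons x xs ih =>
    intro acc hacc
    rw [List.foldl_cons, ih _ (pv_insertBy_pairwise x acc hacc), pv_filter_insertBy x acc k hacc]
    by_cases hxk : x.2 = k
    · rw [List.filter_cons_of_pos (by simp [hxk])]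
      simp [hxk]
    · rw [List.filter_cons_of_neg (by simp [hxk])]
      simp [hxk]

-- STABILITY of PySem.List.sorted: equal-key elements keep their original order
theorem pv_filter_sorted (xs : List (String × String)) (k : String) :
    (PySem.List.sorted xs (fun o => o.2)).filter (fun q => q.2 == k) =
      xs.filter (fun q => q.2 == k) := by
  rw [PySem.List.sorted_eq_foldl_insertBy]
  simpa using pv_filter_foldl xs k [] List.Pairwise.nil

-- in a key-sorted list, everything after the leading equal-key run has a strictly larger key
theorem pv_dropWhile_gt (c : String) (ps : List (String × String))
    (h : ps.Pairwise (fun a b => a.2 ≤ b.2)) (hb : ∀ x ∈ ps, c ≤ x.2) :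
    ∀ x ∈ ps.dropWhile (fun q => q.2 == c), c < x.2 := by
  induction ps with
  | nil => simp
  | cons q qs ih =>
    rw [List.pairwise_cons] at h
    obtain ⟨hq, hqs⟩ := h
    by_cases hqc : q.2 = c
    · rw [List.dropWhile_cons_of_pos (by simp [hqc])]
      exact ih hqs (fun x hx => hb x (List.mem_cons_of_mem _ hx))
    · rw [List.dropWhile_cons_of_neg (by simp [hqc])]
      intro x hx
      have hcq : c < q.2 := lt_of_le_of_ne (hb q List.mem_cons_self) (Ne.symm hqc)
      rcases List.mem_cons.mp hx with rfl | hx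
      · exact hcq
      · exact lt_of_lt_of_le hcq (hq x hx)

-- main characterisation of the groupby pass over a key-sorted list: strictly increasing keys,
-- key set = key set of the input, and each entry is the filtered class of its key
theorem pv_groupby_char (s : List (String × String)) (h : s.Pairwise (fun a b => a.2 ≤ b.2)) :
    (pvGroupbyA s).Pairwise (fun a b => a.1 < b.1) ∧
    (∀ k, k ∈ (pvGroupbyA s).map (fun e => e.1) ↔ k ∈ s.map (fun q => q.2)) ∧
    pvGroupbyA s = ((pvGroupbyA s).map (fun e => e.1)).map
      (fun k => (k, (s.filter (fun q => q.2 == k)).map (fun q => q.1))) := by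
  induction s using pvGroupbyA.induct with
  | case1 => simp [pvGroupbyA]
  | case2 p ps ih =>
    rw [List.pairwise_cons] at h
    obtain ⟨hp, hps⟩ := h
    set t := ps.takeWhile (fun q => q.2 == p.2) with ht
    set r := ps.dropWhile (fun q => q.2 == p.2) with hr
    have hsplit : t ++ r = ps := List.takeWhile_append_dropWhile
    have hrpw : r.Pairwise (fun a b => a.2 ≤ b.2) :=
      hps.sublist (List.dropWhile_sublist _)
    have hrgt : ∀ x ∈ r, p.2 < x.2 := pv_dropWhile_gt p.2 ps hps hp
    have htk : ∀ x ∈ t, x.2 = p.2 := fun x hx => by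
      simpa using List.mem_takeWhile_imp hx
    obtain ⟨ih1, ih2, ih3⟩ := ih hrpw
    have hkeysr : ∀ k ∈ (pvGroupbyA r).map (fun e => e.1), p.2 < k := by
      intro k hk
      rcases List.mem_map.mp ((ih2 k).mp hk) with ⟨x, hx, rfl⟩
      exact hrgt x hx
    have hgrp : pvGroupbyA (p :: ps) =
        (p.2, p.1 :: t.map (fun q => q.1)) :: pvGroupbyA r := by
      rw [pvGroupbyA]
    refine ⟨?_, ?_, ?_⟩
    · rw [hgrp, List.pairwise_cons]
      exact ⟨fun e he => hkeysr e.1 (List.mem_map_of_mem he), ih1⟩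
    · intro k
      rw [hgrp]
      simp only [List.map_cons, List.mem_cons, ih2]
      constructor
      · rintro (rfl | hk)
        · exact Or.inl rfl
        · rcases List.mem_map.mp hk with ⟨x, hx, rfl⟩
          refine Or.inr ?_
          refine List.mem_map_of_mem ?_
          rw [← hsplit]; exact List.mem_append_right _ hx
      · rintro (rfl | hk)
        · exact Or.inl rfl
        · rcases List.mem_map.mp hk with ⟨x, hx, rfl⟩
          rw [← hsplit] at hx
          rcases List.mem_append.mp hx with hx | hx
          · exact Or.inl (htk x hx)
          · exact Or.inr (List.mem_map_of_mem hx)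
    · rw [hgrp]
      simp only [List.map_cons]
      congr 1
      · -- head entry is the class of p.2
        have hfp : (p :: ps).filter (fun q => q.2 == p.2) = p :: t := by
          rw [List.filter_cons_of_pos (by simp), ← hsplit, List.filter_append]
          have h1 : t.filter (fun q => q.2 == p.2) = t :=
            List.filter_eq_self.mpr (fun x hx => by simp [htk x hx])
          have h2 : r.filter (fun q => q.2 == p.2) = [] :=
            List.filter_eq_nil_iff.mpr (fun x hx => by simp [ne_of_gt (hrgt x hx)])
          rw [h1, h2, List.append_nil]
        rw [hfp]
        simp
      · -- tail entries: classes of keys > p.2 are untouched by dropping the leading run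
        conv_lhs => rw [ih3]
        refine List.map_congr_left ?_
        intro k hk
        have hpk : p.2 < k := hkeysr k hk
        have hfk : (p :: ps).filter (fun q => q.2 == k) = r.filter (fun q => q.2 == k) := by
          rw [List.filter_cons_of_neg (by simp [ne_of_lt hpk]), ← hsplit, List.filter_append]
          have h1 : t.filter (fun q => q.2 == k) = [] :=
            List.filter_eq_nil_iff.mpr (fun x hx => by
              simp [htk x hx, ne_of_lt hpk])
          rw [h1, List.nil_append]
        rw [hfk]

-- assembly: both sides are the same list of (key, class) pairs in strictly increasing key order
theorem pv_final (pcs_oids : List (String × String)) :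
    get_oids_by_relation pcs_oids = get_oids_by_relation_alt pcs_oids := by
  simp only [get_oids_by_relation, get_oids_by_relation_alt]
  set s := PySem.List.sorted pcs_oids (fun o => o.2) with hsdef
  set d := pcs_oids.foldl (fun d o => d.modify o.2 [] (fun l => l ++ [o.1]))
    (PySem.Dict.empty : PySem.Dict String (List String)) with hddef
  have hs : s.Pairwise (fun a b => a.2 ≤ b.2) := PySem.List.sorted_pairwise pcs_oids (fun o => o.2)
  obtain ⟨h1, h2, h3⟩ := pv_groupby_char s hs
  -- B-side dict characterisation
  have hnd : d.keys.Nodup := by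
    refine PySem.Dict.nodup_keys_foldl_modify_key pcs_oids (fun o => o.2) []
      (fun d o => fun l => l ++ [o.1]) PySem.Dict.empty ?_
    simp [PySem.Dict.keys_empty]
  have hkeys : d.keys = PySem.Set.ofList (pcs_oids.map (fun o => o.2)) := by
    rw [hddef, PySem.Dict.keys_foldl_modify_key pcs_oids (fun o => o.2) []
      (fun d o => fun l => l ++ [o.1]) PySem.Dict.empty]
    simp [PySem.Dict.keys_empty, PySem.Set.update_eq_append_filter, PySem.Set.contains]
  have hgetD : ∀ k, d.getD k [] = (pcs_oids.filter (fun q => q.2 == k)).map (fun q => q.1) := by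
    intro k
    have hswap : d = (pcs_oids.map (fun o => (o.2, o.1))).foldl
        (fun d p => d.modify p.1 [] (fun l => l ++ [p.2])) PySem.Dict.empty := by
      rw [List.foldl_map]
    rw [hswap, PySem.Dict.getD_foldl_modify_append]
    simp [PySem.Dict.getD_empty, List.filter_map, List.map_map, Function.comp_def]
  have hitems : d.items = d.keys.map (fun k => (k, (pcs_oids.filter (fun q => q.2 == k)).map (fun q => q.1))) := by
    rw [PySem.Dict.items_eq_map_keys d hnd []]
    exact List.map_congr_left (fun k _ => by rw [hgetD k])
  -- A's output written over its key list, with stability replacing s-filters by input filters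
  have hA : pvGroupbyA s = ((pvGroupbyA s).map (fun e => e.1)).map
      (fun k => (k, (pcs_oids.filter (fun q => q.2 == k)).map (fun q => q.1))) := by
    exact h3.trans (List.map_congr_left (fun k _ => by rw [hsdef, pv_filter_sorted]))
  -- the two key lists are permutations of each other
  have hLnd : ((pvGroupbyA s).map (fun e => e.1)).Nodup :=
    ((List.pairwise_map).mpr h1).imp ne_of_lt
  have hmem : ∀ k, k ∈ (pvGroupbyA s).map (fun e => e.1) ↔ k ∈ d.keys := by
    intro k
    rw [h2, hkeys, PySem.Set.mem_ofList]
    constructor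
    · intro hk
      exact ((PySem.List.sorted_perm pcs_oids (fun o => o.2) false).map (fun q => q.2)).mem_iff.mp hk
    · intro hk
      exact ((PySem.List.sorted_perm pcs_oids (fun o => o.2) false).map (fun q => q.2)).mem_iff.mpr hk
  have hperm : ((pvGroupbyA s).map (fun e => e.1)).Perm d.keys :=
    (List.perm_ext_iff_of_nodup hLnd hnd).mpr hmem
  -- name the sorted order of B's items: it is exactly A's output
  refine (PySem.List.sorted_eq_of_perm_of_pairwise_lt d.items (pvGroupbyA s) (fun p => p.1) ?_ h1).symm
  rw [hA, hitems]
  exact hperm.map _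

-- ===== VERDICT (by name: the statement is the Claim_ definition above) =====
theorem get_oids_by_relation_spec : Claim_equal_get_oids_by_relation := by
  unfold Claim_equal_get_oids_by_relation Spec_get_oids_by_relation
  intro pcs_oids _
  exact pv_final pcs_oids
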